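-- pv_equiv track=rewrite | github.com/quency711/fetchReward_Exercise | functions.py | word_dict
-- ===== SOURCE A (Python) =====
-- def word_dict(tokensA, tokensB):
--
--     total_words = set(tokensA).union(set(tokensB))
--     dic_A, dic_B = dict.fromkeys(total_words, 0), dict.fromkeys(total_words, 0)
--
--     for word in tokensA:
--         dic_A[word] += 1
--     for word in tokensB:
--         dic_B[word] += 1
--     return dic_A, dic_B
-- ===== SOURCE B (Python) =====
-- def word_dict(tokensA, tokensB):
--     # One ordered-dedup pass over the concatenation lists the keys; each key's
--     # count then comes from a direct occurrence scan (list.count) of each list.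
--     keys = list(dict.fromkeys(tokensA + tokensB))
--     return ({w: tokensA.count(w) for w in keys},
--             {w: tokensB.count(w) for w in keys})
-- ===== Notes on version B (the rewrite author's own statement) =====
-- stated objective: alternative
-- what changed: B never maintains an incrementally updated counting dict: it lists the distinct keys by one ordered dedup of the concatenation and then computes every count by a per-key occurrence scan (list.count) of each input list, trading A's seed-zeros-then-increment mutation for key-extraction plus counting scans.
import Mathlib
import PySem

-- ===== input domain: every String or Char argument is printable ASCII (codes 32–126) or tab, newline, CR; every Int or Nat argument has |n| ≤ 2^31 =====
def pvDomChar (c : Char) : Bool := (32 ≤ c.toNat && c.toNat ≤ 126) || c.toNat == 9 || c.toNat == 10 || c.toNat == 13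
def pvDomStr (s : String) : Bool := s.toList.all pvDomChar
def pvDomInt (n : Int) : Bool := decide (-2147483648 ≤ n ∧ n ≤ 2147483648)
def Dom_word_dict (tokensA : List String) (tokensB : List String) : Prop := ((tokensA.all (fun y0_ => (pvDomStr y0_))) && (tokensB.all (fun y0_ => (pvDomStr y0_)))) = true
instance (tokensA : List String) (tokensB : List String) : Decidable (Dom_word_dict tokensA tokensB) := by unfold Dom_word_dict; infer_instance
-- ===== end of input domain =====

-- B drops A's seed-zeros-then-increment counting dicts: it lists the distinct keys by one
-- ordered dedup of the concatenation and counts each key by a direct occurrence scan of each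
-- list; objective: alternative algorithm (not faster).

-- ===== PORT A =====
def word_dict (tokensA : List String) (tokensB : List String) : (List (String × Int)) × (List (String × Int)) :=
  let total_words : PySem.Set String :=
    PySem.Set.union (PySem.Set.ofList tokensA) (PySem.Set.ofList tokensB)
  let dicA0 : PySem.Dict String Int :=
    total_words.foldl (fun d w => d.insert w 0) PySem.Dict.empty
  let dicB0 : PySem.Dict String Int :=
    total_words.foldl (fun d w => d.insert w 0) PySem.Dict.empty
  let dicA := tokensA.foldl (fun d w => d.modify w 0 (· + 1)) dicA0
  let dicB := tokensB.foldl (fun d w => d.modify w 0 (· + 1)) dicB0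
  (dicA.items, dicB.items)

-- ===== PORT B =====
def word_dict_alt (tokensA : List String) (tokensB : List String) : (List (String × Int)) × (List (String × Int)) :=
  let keys := PySem.List.dedup (tokensA ++ tokensB)   -- list(dict.fromkeys(tokensA + tokensB))
  (keys.map (fun w => (w, (PySem.List.count tokensA w : Int))),
   keys.map (fun w => (w, (PySem.List.count tokensB w : Int))))

-- ===== PRECONDITION & SPEC =====
def Spec_word_dict (tokensA : List String) (tokensB : List String) (out : (List (String × Int)) × (List (String × Int))) : Prop := out = word_dict_alt tokensA tokensB
instance (tokensA : List String) (tokensB : List String) (out : (List (String × Int)) × (List (String × Int))) : Decidable (Spec_word_dict tokensA tokensB out) := by unfold Spec_word_dict; infer_instance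

-- ===== CLAIM (what is proved, stated in full; the proofs are below) =====
def Claim_equal_word_dict : Prop := ∀ (tokensA : List String) (tokensB : List String), Dom_word_dict tokensA tokensB → Spec_word_dict tokensA tokensB (word_dict tokensA tokensB)

-- ===== LEMMAS AND PROOFS =====

theorem pv_update_of_mem {s : PySem.Set String} (xs : List String)
    (h : ∀ x ∈ xs, x ∈ s) : PySem.Set.update s xs = s := by
  induction xs generalizing s with
  | nil => rfl
  | cons x xs ih =>
      have hx : PySem.Set.add s x = s := PySem.Set.add_of_mem (h x (by simp))
      show PySem.Set.update (PySem.Set.add s x) xs = s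
      rw [hx]
      exact ih (fun y hy => h y (by simp [hy]))

-- one side of A: items of the seeded-then-incremented dict, for tokens ⊆ total
theorem pv_side (tokens : List String) (total : PySem.Set String)
    (hnd : total.Nodup) (hsub : ∀ w ∈ tokens, w ∈ total) :
    (tokens.foldl (fun d w => d.modify w 0 (· + 1))
      (total.foldl (fun (d : PySem.Dict String Int) w => d.insert w 0) PySem.Dict.empty)).items
      = total.map (fun w => (w, (tokens.count w : Int))) := by
  set d0 : PySem.Dict String Int :=
    total.foldl (fun d w => d.insert w 0) PySem.Dict.empty with hd0
  have hitems0 : d0.items = total.map (fun w => (w, (0 : Int))) := by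
    have := PySem.Dict.items_foldl_insert_fresh (κ := String) (ν := Int)
      total (fun w => w) (fun _ => (0 : Int)) PySem.Dict.empty
      (fun a _ => PySem.Dict.contains_empty a) (by simpa using hnd)
    simpa using this
  have hkeys0 : d0.keys = total := by
    simp [PySem.Dict.keys, hitems0, List.map_map, Function.comp_def]
  set dicA := tokens.foldl (fun d w => d.modify w 0 (· + 1)) d0 with hdic
  have hkeys : dicA.keys = total := by
    rw [hdic]
    have := PySem.Dict.keys_foldl_modify (κ := String) (ν := Int)
      tokens 0 (fun _ _ v => v + 1) d0
    simpa [hkeys0, pv_update_of_mem tokens hsub] using this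
  have hgetD0 : ∀ w ∈ total, d0.getD w 0 = 0 := by
    intro w hw
    exact PySem.Dict.getD_of_mem_items d0
      (by rw [hitems0]; exact List.mem_map_of_mem hw) (by rw [hkeys0]; exact hnd) 0
  have hgetD : ∀ w ∈ total, dicA.getD w 0 = (tokens.count w : Int) := by
    intro w hw
    rw [hdic, PySem.Dict.getD_foldl_modify_add_one, hgetD0 w hw]
    simp
  rw [PySem.Dict.items_eq_map_keys dicA (by rw [hkeys]; exact hnd) 0, hkeys]
  exact List.map_congr_left (fun w hw => by rw [hgetD w hw])

theorem pv_update_ofList (s : PySem.Set String) (ys : List String) :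
    PySem.Set.update s (PySem.Set.ofList ys) = PySem.Set.update s ys := by
  rw [PySem.Set.update_eq_append_filter, PySem.Set.update_eq_append_filter,
      PySem.Set.ofList_ofList]

theorem word_dict_eq (tokensA tokensB : List String) :
    word_dict tokensA tokensB = word_dict_alt tokensA tokensB := by
  have hkeys : PySem.List.dedup (tokensA ++ tokensB)
      = PySem.Set.union (PySem.Set.ofList tokensA) (PySem.Set.ofList tokensB) := by
    rw [PySem.List.dedup_eq_ofList, PySem.Set.ofList_append, PySem.Set.union,
        pv_update_ofList]
  set total : PySem.Set String :=
    PySem.Set.union (PySem.Set.ofList tokensA) (PySem.Set.ofList tokensB) with htot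
  have hnd : total.Nodup :=
    PySem.Set.nodup_union _ _ (PySem.Set.nodup_ofList tokensA)
  have hsubA : ∀ w ∈ tokensA, w ∈ total :=
    fun w hw => (PySem.Set.mem_union _ _ w).mpr (Or.inl ((PySem.Set.mem_ofList _ w).mpr hw))
  have hsubB : ∀ w ∈ tokensB, w ∈ total :=
    fun w hw => (PySem.Set.mem_union _ _ w).mpr (Or.inr ((PySem.Set.mem_ofList _ w).mpr hw))
  show ((tokensA.foldl (fun d w => d.modify w 0 (· + 1))
          (total.foldl (fun (d : PySem.Dict String Int) w => d.insert w 0) PySem.Dict.empty)).items,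
        (tokensB.foldl (fun d w => d.modify w 0 (· + 1))
          (total.foldl (fun (d : PySem.Dict String Int) w => d.insert w 0) PySem.Dict.empty)).items)
      = ((PySem.List.dedup (tokensA ++ tokensB)).map
            (fun w => (w, (PySem.List.count tokensA w : Int))),
         (PySem.List.dedup (tokensA ++ tokensB)).map
            (fun w => (w, (PySem.List.count tokensB w : Int))))
  rw [hkeys, pv_side tokensA total hnd hsubA, pv_side tokensB total hnd hsubB]
  simp [PySem.List.count_eq]

-- ===== VERDICT (by name: the statement is the Claim_ definition above) =====
theorem word_dict_spec : Claim_equal_word_dict := by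
  intro tokensA tokensB _
  unfold Spec_word_dict
  exact word_dict_eq tokensA tokensB
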